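/- GENERATED by farm/mkstatement.py from design/units.tsv (unit `compute_sorted_huffman.COMPOSITION`) and the Specs of Vorbis/Spec/*.lean — do not edit.
   THE STATEMENT of the proof unit `compute_sorted_huffman.COMPOSITION`: the function `compute_sorted_huffman` (219 instructions) satisfies its contract,
   GIVEN THE STATEMENTS OF ITS 4 SEGMENTS (`Vorbis.Spec.SortedHuffman.Claim<k> Lay μ u₀`: what the unit `compute_sorted_huffman.<k>` proves).
   No machine code is walked: `ReachVia.trans` along the segments (the exit assertion of a segment is the entry assertion of
   its successor), an induction on the loop measures. What the names mean: Vorbis/Spec/Basic.lean. The theorem to prove: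
   `theorem compute_sorted_huffman_COMPOSITION_ok : Vorbis.Spec.compute_sorted_huffman_COMPOSITION.Statement`. -/
import Vorbis.Spec.Codebook
import Vorbis.Spec.Codebook.SortedHuffman
namespace Vorbis.Spec.compute_sorted_huffman_COMPOSITION
open X86 X86.User Asan

/-- The statement of unit `compute_sorted_huffman.COMPOSITION`. -/
def Statement : Prop :=
  ∀ (Lay : Layout) (_hLay : Lay.hi = 0x1000000) (μ : Microarch) (_hμ : UserX.MicroOK μ) (u₀ : State)
    (_h_compute_sorted_huffman_1 : Vorbis.Spec.SortedHuffman.Claim1 Lay μ u₀)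
    (_h_compute_sorted_huffman_2 : Vorbis.Spec.SortedHuffman.Claim2 Lay μ u₀)
    (_h_compute_sorted_huffman_3 : Vorbis.Spec.SortedHuffman.Claim3 Lay μ u₀)
    (_h_compute_sorted_huffman_4 : Vorbis.Spec.SortedHuffman.Claim4 Lay μ u₀),
    ∀ (others : List Obj) (frames : List (Nat × FrameLayout)) (Blk : Block → Prop), Calls Lay μ Vorbis.WayInv (Vorbis.conv u₀) Vorbis.L.compute_sorted_huffman.entry (Vorbis.Spec.compute_sorted_huffman.spec others frames Blk)

end Vorbis.Spec.compute_sorted_huffman_COMPOSITION
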